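-- pv_equiv track=rewrite | github.com/askar-saitov/StepikQuickStart | part1/task31.py | getFirstOne
-- ===== SOURCE A (Python) =====
-- def getFirstOne(n, z):
--     l = -1
--     r = n
--     step = 0
--     while l+1 < r:
--         step += 1
--         mid = (l+r) // 2
--         if mid < z:
--             l = mid
--         else:
--             r = mid
--     return step
-- ===== SOURCE B (Python) =====
-- def getFirstOne(n, z):
--     # Phase 1: iterate only while z lies strictly inside the open interval (l+1, r).
--     l, r = -1, n
--     step = 0
--     while l + 1 < z < r:
--         mid = (l + r) // 2
--         l, r = (mid, r) if mid < z else (l, mid)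
--         step += 1
--     # Phase 2: the direction is now fixed, so the remaining step count is a
--     # closed-form bit_length of the interval width.
--     w = r - l
--     if w <= 1:
--         return step
--     return step + (w.bit_length() - 1 if z <= l + 1 else (w - 1).bit_length())
-- ===== Notes on version B (the rewrite author's own statement) =====
-- stated objective: alternative
-- what changed: B iterates only while z lies strictly inside the open interval and replaces the remaining pure-left/pure-right halving tail by a closed-form bit_length of the interval width.
import Mathlib
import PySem

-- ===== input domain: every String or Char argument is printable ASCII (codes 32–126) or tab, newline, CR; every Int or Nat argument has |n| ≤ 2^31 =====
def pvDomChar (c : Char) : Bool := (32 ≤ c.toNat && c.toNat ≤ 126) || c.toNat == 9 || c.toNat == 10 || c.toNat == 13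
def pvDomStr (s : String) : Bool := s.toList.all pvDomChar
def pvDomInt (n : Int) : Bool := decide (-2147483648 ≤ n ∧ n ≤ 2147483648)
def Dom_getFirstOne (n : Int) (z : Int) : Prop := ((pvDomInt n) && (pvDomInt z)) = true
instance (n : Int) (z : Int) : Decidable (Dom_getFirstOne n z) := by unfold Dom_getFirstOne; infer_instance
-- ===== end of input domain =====

-- B loops only while z is strictly inside the open interval and finishes the remaining
-- pure one-sided halving tail with a closed-form bit_length (objective: alternative algorithm).

-- ===== PORT A =====
-- A's while loop over the mutable state (l, r, step); terminates because r - l shrinks.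
def getFirstOneLoop (z : Int) (l r step : Int) : Int :=
  if _h : l + 1 < r then
    let step' := step + 1
    let mid := PySem.Int.floordiv (l + r) 2
    if mid < z then getFirstOneLoop z mid r step'
    else getFirstOneLoop z l mid step'
  else step
  termination_by (r - l).toNat
  decreasing_by
  · have hm : PySem.Int.floordiv (l + r) 2 = (l + r) / 2 :=
      PySem.Int.floordiv_eq_ediv_of_pos (by omega)
    simp only [hm]; omega
  · have hm : PySem.Int.floordiv (l + r) 2 = (l + r) / 2 :=
      PySem.Int.floordiv_eq_ediv_of_pos (by omega)
    simp only [hm]; omega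

def getFirstOne (n : Int) (z : Int) : Int := getFirstOneLoop z (-1) n 0

-- ===== PORT B =====
-- Source B's loop runs only while l+1 < z < r; on loop exit the tail is computed from the
-- interval width w with Python's w.bit_length(), ported as Nat.size w.toNat (w ≥ 0 there).
def getFirstOneAltLoop (z : Int) (l r step : Int) : Int :=
  if _h : l + 1 < z ∧ z < r then
    let mid := PySem.Int.floordiv (l + r) 2
    let p := if mid < z then (mid, r) else (l, mid)
    getFirstOneAltLoop z p.1 p.2 (step + 1)
  else
    let w := r - l
    if w ≤ 1 then step
    else if z ≤ l + 1 then step + ((Nat.size w.toNat : Int) - 1)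
    else step + (Nat.size (w - 1).toNat : Int)
  termination_by (r - l).toNat
  decreasing_by
  have hm : PySem.Int.floordiv (l + r) 2 = (l + r) / 2 :=
    PySem.Int.floordiv_eq_ediv_of_pos (by omega)
  split <;> simp only [hm] <;> omega

def getFirstOne_alt (n : Int) (z : Int) : Int := getFirstOneAltLoop z (-1) n 0

-- ===== PRECONDITION & SPEC =====
def Spec_getFirstOne (n : Int) (z : Int) (out : Int) : Prop := out = getFirstOne_alt n z
instance (n : Int) (z : Int) (out : Int) : Decidable (Spec_getFirstOne n z out) := by unfold Spec_getFirstOne; infer_instance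

-- ===== CLAIM (what is proved, stated in full; the proofs are below) =====
def Claim_equal_getFirstOne : Prop := ∀ (n : Int) (z : Int), Dom_getFirstOne n z → Spec_getFirstOne n z (getFirstOne n z)

-- ===== LEMMAS AND PROOFS =====
-- bit-length recurrence: size n = size (n/2) + 1 for n ≥ 1
theorem size_half (n : ℕ) (h : 1 ≤ n) : Nat.size n = Nat.size (n / 2) + 1 := by
  conv_lhs => rw [← Nat.bit_bodd_div2 n]
  rw [Nat.size_bit (by rw [Nat.bit_bodd_div2]; omega), Nat.div2_val]

-- A's loop in the pure-left region (z ≤ l+1): step count is the floor-halving chain.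
theorem loop_left (z l r step : Int) (hz : z ≤ l + 1) :
    getFirstOneLoop z l r step =
      step + (if r - l ≤ 1 then 0 else (Nat.size (r - l).toNat : Int) - 1) := by
  by_cases h : l + 1 < r
  · rw [getFirstOneLoop]
    have hm : PySem.Int.floordiv (l + r) 2 = (l + r) / 2 :=
      PySem.Int.floordiv_eq_ediv_of_pos (by omega)
    simp only [dif_pos h, hm]
    rw [if_neg (by omega : ¬ (l + r) / 2 < z)]
    rw [loop_left z l ((l + r) / 2) (step + 1) hz]
    have hmid : (l + r) / 2 - l = (r - l) / 2 := by omega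
    rw [if_neg (by omega : ¬ r - l ≤ 1)]
    rw [hmid]
    by_cases hw : (r - l) / 2 ≤ 1
    · rw [if_pos hw]
      have h23 : r - l = 2 ∨ r - l = 3 := by omega
      have e2 : ((Int.toNat 2).size : Int) = 2 := by decide
      have e3 : ((Int.toNat 3).size : Int) = 2 := by decide
      rcases h23 with h2 | h2 <;> rw [h2] <;> omega
    · rw [if_neg hw]
      have hs : Nat.size (r - l).toNat = Nat.size ((r - l).toNat / 2) + 1 :=
        size_half _ (by omega)
      have ht : ((r - l) / 2).toNat = (r - l).toNat / 2 := by omega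
      rw [ht, hs]
      push_cast
      ring
  · rw [getFirstOneLoop]
    simp only [dif_neg h]
    rw [if_pos (by omega : r - l ≤ 1)]
    ring
  termination_by (r - l).toNat
  decreasing_by omega

-- A's loop in the pure-right region (z ≥ r): step count is the ceil-halving chain.
theorem loop_right (z l r step : Int) (hz : r ≤ z) :
    getFirstOneLoop z l r step =
      step + (if r - l ≤ 1 then 0 else (Nat.size (r - l - 1).toNat : Int)) := by
  by_cases h : l + 1 < r
  · rw [getFirstOneLoop]
    have hm : PySem.Int.floordiv (l + r) 2 = (l + r) / 2 :=
      PySem.Int.floordiv_eq_ediv_of_pos (by omega)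
    simp only [dif_pos h, hm]
    rw [if_pos (by omega : (l + r) / 2 < z)]
    rw [loop_right z ((l + r) / 2) r (step + 1) hz]
    have hmid : r - (l + r) / 2 = r - l - (r - l) / 2 := by omega
    rw [if_neg (by omega : ¬ r - l ≤ 1)]
    rw [hmid]
    by_cases hw : r - l - (r - l) / 2 ≤ 1
    · rw [if_pos hw]
      have h2 : r - l = 2 := by omega
      have e1 : (((2:Int) - 1).toNat.size : Int) = 1 := by decide
      rw [h2]; omega
    · rw [if_neg hw]
      have hs : Nat.size (r - l - 1).toNat = Nat.size ((r - l - 1).toNat / 2) + 1 :=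
        size_half _ (by omega)
      have ht : (r - l - (r - l) / 2 - 1).toNat = (r - l - 1).toNat / 2 := by omega
      rw [ht, hs]
      push_cast
      ring
  · rw [getFirstOneLoop]
    simp only [dif_neg h]
    rw [if_pos (by omega : r - l ≤ 1)]
    ring
  termination_by (r - l).toNat
  decreasing_by omega

-- While z is strictly inside, the two loops take the same step; on exit the tails agree.
theorem loop_eq_altLoop (z l r step : Int) :
    getFirstOneLoop z l r step = getFirstOneAltLoop z l r step := by
  by_cases h : l + 1 < z ∧ z < r
  · rw [getFirstOneLoop, getFirstOneAltLoop]
    simp only [dif_pos h, dif_pos (by omega : l + 1 < r)]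
    split
    · exact loop_eq_altLoop z _ r (step + 1)
    · exact loop_eq_altLoop z l _ (step + 1)
  · rw [getFirstOneAltLoop]
    simp only [dif_neg h]
    by_cases hw : r - l ≤ 1
    · rw [if_pos hw, getFirstOneLoop, dif_neg (by omega : ¬ l + 1 < r)]
    · rw [if_neg hw]
      by_cases hzl : z ≤ l + 1
      · rw [if_pos hzl, loop_left z l r step hzl, if_neg hw]
      · rw [if_neg hzl, loop_right z l r step (by omega), if_neg hw]
  termination_by (r - l).toNat
  decreasing_by
  · have hm : PySem.Int.floordiv (l + r) 2 = (l + r) / 2 :=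
      PySem.Int.floordiv_eq_ediv_of_pos (by omega)
    simp only [hm] at *; omega
  · have hm : PySem.Int.floordiv (l + r) 2 = (l + r) / 2 :=
      PySem.Int.floordiv_eq_ediv_of_pos (by omega)
    simp only [hm] at *; omega

-- ===== VERDICT (by name: the statement is the Claim_ definition above) =====
theorem getFirstOne_spec : Claim_equal_getFirstOne := by
  intro n z _
  unfold Spec_getFirstOne getFirstOne getFirstOne_alt
  exact loop_eq_altLoop z (-1) n 0
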